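-- pv_equiv track=rewrite | github.com/chibicitiberiu/chord-notepad | src/audio/guitar_chord_picker.py | _is_playable
-- ===== SOURCE A (Python) =====
-- from typing import Dict, List, Optional, Tuple, Set, Union, TYPE_CHECKING
--
-- def _is_playable(fingering: Union[List[int], Tuple[int, ...]]) -> bool:
--     """Check if a fingering is physically playable"""
--
--     fretted = [f for f in fingering if f > 0]
--
--     if not fretted:
--         return True
--
--     # Check stretch
--     if max(fretted) - min(fretted) > 4:
--         return False
--
--     # Check finger count
--     unique_frets = set(fretted)
--     if len(unique_frets) > 4:
--         # Check for barre possibility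
--         for fret in unique_frets:
--             if fretted.count(fret) >= 2:
--                 if len(unique_frets) - 1 <= 4:
--                     return True
--         return False
--
--     return True
-- ===== SOURCE B (Python) =====
-- def _is_playable(fingering):
--     """Check if a fingering is physically playable (single pass with an accumulator)"""
--     mn = None
--     mx = None
--     seen = set()
--     dup = False
--     for f in fingering:
--         if f <= 0:
--             continue
--         if mn is None or f < mn:
--             mn = f
--         if mx is None or f > mx:
--             mx = f
--         if f in seen:
--             dup = True
--         else:
--             seen.add(f)
--     if mn is None:
--         return True
--     if mx - mn > 4:
--         return False
--     # span <= 4 bounds the distinct frets by 5, so playable iff at most 4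
--     # distinct frets or a repeated fret (barre) frees a finger
--     return len(seen) <= 4 or dup
-- ===== Notes on version B (the rewrite author's own statement) =====
-- stated objective: alternative
-- what changed: A's staged passes (build a fretted list, max/min over it, a set, then a barre loop calling fretted.count per unique fret) are replaced by one fold over the input accumulating min, max, the seen-set and a duplicate flag, followed by a single O(1) decision (span <= 4 forces at most 5 distinct frets, so the barre loop reduces to the duplicate flag).
import Mathlib
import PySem

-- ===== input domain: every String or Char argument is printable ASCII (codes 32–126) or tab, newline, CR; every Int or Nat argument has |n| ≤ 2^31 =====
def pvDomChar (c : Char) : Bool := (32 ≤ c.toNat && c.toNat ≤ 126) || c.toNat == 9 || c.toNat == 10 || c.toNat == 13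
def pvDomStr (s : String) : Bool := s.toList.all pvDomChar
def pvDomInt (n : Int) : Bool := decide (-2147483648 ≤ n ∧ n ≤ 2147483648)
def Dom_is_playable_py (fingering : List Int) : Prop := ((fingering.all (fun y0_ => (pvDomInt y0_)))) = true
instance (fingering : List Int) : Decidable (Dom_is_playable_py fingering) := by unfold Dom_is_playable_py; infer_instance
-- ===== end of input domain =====

-- B replaces A's staged passes (filter list, max/min, set, barre loop with .count scans)
-- by ONE pass accumulating min, max, the seen-set and a duplicate flag, then a direct decision (alternative decomposition).

-- ===== PORT A =====
def is_playable_py (fingering : List Int) : Bool :=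
  let fretted := fingering.filter (fun f => 0 < f)
  if fretted = [] then true
  else if (PySem.List.max? fretted (fun y => y)).getD 0 - (PySem.List.min? fretted (fun y => y)).getD 0 > 4 then
    false
  else
    let unique_frets := PySem.Set.ofList fretted
    if 4 < unique_frets.length then
      -- early-return loop over the set: any element with count ≥ 2 and (uniq − 1 ≤ 4) yields True
      unique_frets.any (fun fret =>
        decide (2 ≤ fretted.count fret) && decide (unique_frets.length - 1 ≤ 4))
    else true

-- ===== PORT B =====
-- loop body of Source B: state = (mn, mx, seen, dup)
def pvStepB (s : Option Int × Option Int × PySem.Set Int × Bool) (f : Int) :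
    Option Int × Option Int × PySem.Set Int × Bool :=
  if f ≤ 0 then s
  else
    let mn := match s.1 with | none => some f | some m => if f < m then some f else some m
    let mx := match s.2.1 with | none => some f | some m => if m < f then some f else some m
    if PySem.Set.contains s.2.2.1 f then (mn, mx, s.2.2.1, true)
    else (mn, mx, PySem.Set.add s.2.2.1 f, s.2.2.2)

def is_playable_py_alt (fingering : List Int) : Bool :=
  let st := fingering.foldl pvStepB (none, none, PySem.Set.empty, false)
  match st.1 with
  | none => true                                   -- mn is None: no fretted string
  | some mn =>
    if st.2.1.getD 0 - mn > 4 then false           -- mx is some whenever mn is; getD is never the default here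
    else decide (PySem.Set.len st.2.2.1 ≤ 4) || st.2.2.2

-- ===== PRECONDITION & SPEC =====
def Spec_is_playable_py (fingering : List Int) (out : Bool) : Prop := out = is_playable_py_alt fingering
instance (fingering : List Int) (out : Bool) : Decidable (Spec_is_playable_py fingering out) := by unfold Spec_is_playable_py; infer_instance

-- ===== CLAIM (what is proved, stated in full; the proofs are below) =====
def Claim_equal_is_playable_py : Prop := ∀ (fingering : List Int), Dom_is_playable_py fingering → Spec_is_playable_py fingering (is_playable_py fingering)

-- ===== LEMMAS AND PROOFS =====

-- first extremum as Python's running fold, per component for the filtered list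
def pvMn (l : List Int) : Option Int := match l with | [] => none | x :: t => some (t.foldl min x)
def pvMx (l : List Int) : Option Int := match l with | [] => none | x :: t => some (t.foldl max x)

-- the guarded fold over the raw list is the unguarded fold over the filtered list
theorem pv_fold_filter (xs : List Int) (s : Option Int × Option Int × PySem.Set Int × Bool) :
    xs.foldl pvStepB s = (xs.filter (fun f => 0 < f)).foldl pvStepB s := by
  induction xs generalizing s with
  | nil => rfl
  | cons a t ih =>
    by_cases h : 0 < a
    · simp only [List.filter_cons, h, decide_true, if_true, List.foldl_cons, ih]
    · have h' : a ≤ 0 := by omega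
      simp only [List.filter_cons, h, decide_false, Bool.false_eq_true, if_false, List.foldl_cons]
      rw [show pvStepB s a = s from by simp [pvStepB, h'], ih]

-- characterisation of the fold state over a positive-element list l
theorem pv_fold_char (l : List Int) (hpos : ∀ x ∈ l, 0 < x) :
    l.foldl pvStepB (none, none, PySem.Set.empty, false)
      = (pvMn l, pvMx l, PySem.Set.ofList l, decide (¬ l.Nodup)) := by
  induction l using List.reverseRecOn with
  | nil => simp [pvMn, pvMx, PySem.Set.ofList, PySem.Set.empty]
  | append_singleton t a ih =>
    have ha : 0 < a := hpos a (by simp)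
    have ht : ∀ x ∈ t, 0 < x := fun x hx => hpos x (by simp [hx])
    rw [List.foldl_append, ih ht]
    simp only [List.foldl_cons, List.foldl_nil]
    have hmn : (match pvMn t with | none => some a | some m => if a < m then some a else some m)
        = pvMn (t ++ [a]) := by
      cases t with
      | nil => simp [pvMn]
      | cons x u =>
        simp only [pvMn, List.cons_append, List.foldl_append, List.foldl_cons, List.foldl_nil]
        rw [min_def]
        split_ifs <;> first | rfl | omega
    have hmx : (match pvMx t with | none => some a | some m => if m < a then some a else some m)
        = pvMx (t ++ [a]) := by
      cases t with
      | nil => simp [pvMx]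
      | cons x u =>
        simp only [pvMx, List.cons_append, List.foldl_append, List.foldl_cons, List.foldl_nil]
        rw [max_def]
        split_ifs <;> first | rfl | omega | (congr 1; omega)
    have hofl : PySem.Set.ofList (t ++ [a]) = PySem.Set.add (PySem.Set.ofList t) a := by
      rw [PySem.Set.ofList_eq_foldl, PySem.Set.ofList_eq_foldl, List.foldl_append]
      rfl
    have hdup : (decide (¬ t.Nodup) || decide (a ∈ t)) = decide (¬ (t ++ [a]).Nodup) := by
      by_cases hnd : t.Nodup <;> by_cases hm : a ∈ t <;>
        simp [hnd, hm, List.nodup_append]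
    have hc : (PySem.Set.contains (PySem.Set.ofList t) a) = decide (a ∈ t) := by
      by_cases hm : a ∈ t
      · simp only [hm, decide_true]
        exact List.elem_eq_true_of_mem ((PySem.Set.mem_ofList t a).mpr hm)
      · simp only [hm, decide_false]
        rw [Bool.eq_false_iff]
        intro hcc
        exact hm ((PySem.Set.mem_ofList t a).mp (List.mem_of_elem_eq_true hcc))
    simp only [pvStepB, if_neg (by omega : ¬ a ≤ 0), hc]
    by_cases hm : a ∈ t
    · simp only [hm, decide_true, if_true]
      rw [Prod.mk.injEq, Prod.mk.injEq, Prod.mk.injEq]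
      refine ⟨hmn, hmx, ?_, ?_⟩
      · rw [hofl, PySem.Set.add_of_mem ((PySem.Set.mem_ofList t a).mpr hm)]
      · rw [← hdup]; simp [hm]
    · simp only [hm, decide_false, Bool.false_eq_true, if_false]
      rw [Prod.mk.injEq, Prod.mk.injEq, Prod.mk.injEq]
      refine ⟨hmn, hmx, hofl.symm, ?_⟩
      rw [← hdup]; simp [hm]

-- distinct-set facts reused from the staged reading of both programs
theorem pv_any_count_iff (l : List Int) :
    ((PySem.Set.ofList l : List Int).any (fun x => decide (2 ≤ l.count x)) = true) ↔ ¬ l.Nodup := by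
  rw [List.any_eq_true]
  constructor
  · rintro ⟨x, _, hx⟩ hnd
    have := (List.nodup_iff_count_le_one.mp hnd) x
    simp at hx; omega
  · intro hnd
    rcases not_forall.mp (fun h => hnd (List.nodup_iff_count_le_one.mpr h)) with ⟨x, hx⟩
    have hmem : x ∈ l := List.count_pos_iff.mp (by omega)
    exact ⟨x, (PySem.Set.mem_ofList l x).mpr hmem, by simp; omega⟩

-- with a span ≤ 4 there are at most five distinct frets
theorem pv_span_bound (l : List Int) (x : Int) (t : List Int) (hl : l = x :: t)
    (hspan : t.foldl max x - t.foldl min x ≤ 4) :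
    (PySem.Set.ofList l : List Int).length ≤ 5 := by
  set s := (PySem.Set.ofList l : List Int) with hs
  have hnd : s.Nodup := PySem.Set.nodup_ofList l
  have hmn := PySem.List.foldl_min_le t x
  have hmx := PySem.List.le_foldl_max t x
  have hsub : ∀ y ∈ s, y ∈ Finset.Icc (t.foldl min x) (t.foldl min x + 4) := by
    intro y hy
    have hyl : y ∈ l := (PySem.Set.mem_ofList l y).mp hy
    rw [hl] at hyl
    have h1 : t.foldl min x ≤ y := by
      rcases List.mem_cons.mp hyl with h | h
      · subst h; exact hmn.1
      · exact hmn.2 y h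
    have h2 : y ≤ t.foldl max x := by
      rcases List.mem_cons.mp hyl with h | h
      · subst h; exact hmx.1
      · exact hmx.2 y h
    rw [Finset.mem_Icc]; omega
  have hcard : s.toFinset.card = s.length := List.toFinset_card_of_nodup hnd
  have hsub' : s.toFinset ⊆ Finset.Icc (t.foldl min x) (t.foldl min x + 4) := by
    intro y hy; exact hsub y (List.mem_toFinset.mp hy)
  have := Finset.card_le_card hsub'
  rw [hcard] at this
  rw [Int.card_Icc] at this
  omega

-- ===== VERDICT (by name: the statement is the Claim_ definition above) =====
theorem is_playable_py_spec : Claim_equal_is_playable_py := by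
  intro fingering _
  unfold Spec_is_playable_py is_playable_py is_playable_py_alt
  rw [pv_fold_filter]
  set l := fingering.filter (fun f => 0 < f) with hl
  have hpos : ∀ x ∈ l, 0 < x := by
    intro x hx; rw [hl] at hx
    have := List.of_mem_filter hx; simpa using this
  rw [pv_fold_char l hpos]
  cases l with
  | nil => simp [pvMn]
  | cons x t =>
    have hne : (x :: t : List Int) ≠ [] := by simp
    simp only [hne, if_false, pvMn, pvMx,
      PySem.List.max?_id_cons, PySem.List.min?_id_cons, Option.getD_some]
    by_cases hspan : t.foldl max x - t.foldl min x > 4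
    · simp [hspan]
    · have hspan' : t.foldl max x - t.foldl min x ≤ 4 := by omega
      simp only [hspan, if_false]
      set s := (PySem.Set.ofList (x :: t) : List Int) with hs
      have hlen5 : s.length ≤ 5 := pv_span_bound (x :: t) x t rfl hspan'
      have hlenlen : PySem.Set.len s = (s.length : Int) := rfl
      by_cases hle : s.length ≤ 4
      · have : ¬ (4 < s.length) := by omega
        have hd : decide (PySem.Set.len s ≤ 4) = true := by
          rw [hlenlen]; simp; omega
        rw [if_neg this, hd]; simp
      · have h5 : s.length = 5 := by omega
        have h4 : 4 < s.length := by omega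
        have hd : decide (PySem.Set.len s ≤ 4) = false := by
          rw [hlenlen]; simp; omega
        simp only [if_pos h4, hd, Bool.false_or]
        have hin : ∀ y : Int, (decide (2 ≤ (x :: t).count y) && decide (s.length - 1 ≤ 4))
            = decide (2 ≤ (x :: t).count y) := by
          intro y; rw [h5]; simp
        simp only [hin]
        by_cases hnd : (x :: t).Nodup
        · have : s.any (fun y => decide (2 ≤ (x :: t).count y)) = false := by
            rw [Bool.eq_false_iff]
            intro hcc
            exact (pv_any_count_iff (x :: t)).mp hcc hnd
          rw [this]; simp [hnd]
        · rw [(pv_any_count_iff (x :: t)).mpr hnd]; simp [hnd]
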